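-- pv_equiv track=rewrite | github.com/qianzii2/Z1DB | server/client.py | _has_real_content
-- ===== SOURCE A (Python) =====
-- def _has_real_content(stmt: str) -> bool:
--     i = 0
--     while i < len(stmt):
--         ch = stmt[i]
--         if ch.isspace() or ch == ';':
--             i += 1; continue
--         if ch == '-' and i + 1 < len(stmt) and stmt[i + 1] == '-':
--             while i < len(stmt) and stmt[i] != '\n':
--                 i += 1
--             continue
--         if ch == '/' and i + 1 < len(stmt) and stmt[i + 1] == '*':
--             i += 2; d = 1
--             while i < len(stmt) and d > 0:
--                 if stmt[i] == '/' and i + 1 < len(stmt) and stmt[i + 1] == '*':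
--                     d += 1; i += 1
--                 elif stmt[i] == '*' and i + 1 < len(stmt) and stmt[i + 1] == '/':
--                     d -= 1; i += 1
--                 i += 1
--             continue
--         return True
--     return False
-- ===== SOURCE B (Python) =====
-- def _has_real_content(stmt: str) -> bool:
--     # Phase 1: one linear pass builds the list of characters that lie outside
--     # comments; a tiny state machine ('N' normal, 'L' line comment, 'B' block
--     # comment with a depth counter) with a one-char lookahead drives it.
--     kept = []
--     state = 'N'
--     depth = 0
--     skip = False
--     nxts = list(stmt[1:]) + [None]
--     for ch, nxt in zip(stmt, nxts):
--         if skip: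
--             skip = False
--         elif state == 'N':
--             if ch == '-' and nxt == '-':
--                 state = 'L'
--             elif ch == '/' and nxt == '*':
--                 state = 'B'
--                 depth = 1
--                 skip = True
--             else:
--                 kept.append(ch)
--         elif state == 'L':
--             if ch == '\n':
--                 state = 'N'
--         else:
--             if ch == '/' and nxt == '*':
--                 depth += 1
--                 skip = True
--             elif ch == '*' and nxt == '/':
--                 depth -= 1
--                 skip = True
--                 if depth == 0:
--                     state = 'N'
--     # Phase 2: any significant character left?
--     return any(not c.isspace() and c != ';' for c in kept)
-- ===== Notes on version B (the rewrite author's own statement) =====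
-- stated objective: alternative
-- what changed: Replaces A's early-exit index-jumping scanner (nested while loops that return True at the first significant character) by a two-phase design: one left-to-right fold of a three-state machine (normal / line comment / block comment with depth counter, one-character lookahead) that collects the characters outside comments, followed by a separate test that some collected character is neither whitespace nor a statement separator.
import Mathlib
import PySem

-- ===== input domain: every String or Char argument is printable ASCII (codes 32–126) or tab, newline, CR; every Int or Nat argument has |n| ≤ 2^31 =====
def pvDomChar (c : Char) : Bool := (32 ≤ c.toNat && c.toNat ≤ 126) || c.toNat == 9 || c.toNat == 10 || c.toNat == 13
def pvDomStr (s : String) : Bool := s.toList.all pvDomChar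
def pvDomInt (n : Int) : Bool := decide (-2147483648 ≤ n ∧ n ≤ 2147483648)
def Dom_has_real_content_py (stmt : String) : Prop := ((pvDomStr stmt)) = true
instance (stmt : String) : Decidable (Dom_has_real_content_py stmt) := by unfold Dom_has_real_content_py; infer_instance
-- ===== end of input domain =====

-- B replaces A's early-exit index-jumping scanner by a two-phase fold (collect non-comment chars, then test them); alternative decomposition, same cost.

-- ===== PORT A =====
-- inner 'while i < len(stmt) and stmt[i] != "\n"' of the line-comment branch
def aLine (s : List Char) (i : Nat) : Nat :=
  if h : i < s.length then
    if hc : s.getD i ' ' ≠ '\n' then aLine s (i + 1) else i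
  else i
termination_by s.length - i
decreasing_by exact Nat.sub_succ_lt_self s.length i h

-- inner 'while i < len(stmt) and d > 0' of the block-comment branch
def aBlock (s : List Char) (i : Nat) (d : Int) : Nat :=
  if h : i < s.length ∧ 0 < d then
    if s.getD i ' ' = '/' ∧ i + 1 < s.length ∧ s.getD (i + 1) ' ' = '*' then
      aBlock s (i + 2) (d + 1)
    else if s.getD i ' ' = '*' ∧ i + 1 < s.length ∧ s.getD (i + 1) ' ' = '/' then
      aBlock s (i + 2) (d - 1)
    else aBlock s (i + 1) d
  else i
termination_by s.length - i
decreasing_by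
  all_goals first
    | exact Nat.sub_succ_lt_self s.length i h.1
    | exact Nat.lt_of_le_of_lt (Nat.sub_le_sub_left (Nat.le_succ (i + 1)) s.length) (Nat.sub_succ_lt_self s.length i h.1)

-- termination helpers for the outer loop (cited in decreasing_by)
theorem aLine_ge (s : List Char) (i : Nat) : i ≤ aLine s i := by
  by_cases h : i < s.length
  · rw [aLine, dif_pos h]
    split
    · exact Nat.le_trans (Nat.le_succ i) (aLine_ge s (i + 1))
    · exact Nat.le_refl i
  · rw [aLine, dif_neg h]
termination_by s.length - i
decreasing_by exact Nat.sub_succ_lt_self s.length i h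

theorem aBlock_ge (s : List Char) (i : Nat) (d : Int) : i ≤ aBlock s i d := by
  by_cases h : i < s.length ∧ 0 < d
  · rw [aBlock, dif_pos h]
    split
    · exact Nat.le_trans (Nat.le_add_right i 2) (aBlock_ge s (i + 2) (d + 1))
    · split
      · exact Nat.le_trans (Nat.le_add_right i 2) (aBlock_ge s (i + 2) (d - 1))
      · exact Nat.le_trans (Nat.le_succ i) (aBlock_ge s (i + 1) d)
  · rw [aBlock, dif_neg h]
termination_by s.length - i
decreasing_by
  all_goals first
    | exact Nat.sub_succ_lt_self s.length i h.1
    | exact Nat.lt_of_le_of_lt (Nat.sub_le_sub_left (Nat.le_succ (i + 1)) s.length) (Nat.sub_succ_lt_self s.length i h.1)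

theorem aLine_gt (s : List Char) (i : Nat) (h : i < s.length) (hc : s.getD i ' ' ≠ '\n') :
    i < aLine s i := by
  rw [aLine, dif_pos h, dif_pos hc]
  exact Nat.lt_of_lt_of_le (Nat.lt_succ_self i) (aLine_ge s (i + 1))

-- the outer 'while i < len(stmt)' loop of A
def aLoop (s : List Char) (i : Nat) : Bool :=
  if h : i < s.length then
    if hc1 : PySem.Chars.isspace (s.getD i ' ') = true ∨ s.getD i ' ' = ';' then
      aLoop s (i + 1)
    else if hc2 : s.getD i ' ' = '-' ∧ i + 1 < s.length ∧ s.getD (i + 1) ' ' = '-' then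
      aLoop s (aLine s i)
    else if hc3 : s.getD i ' ' = '/' ∧ i + 1 < s.length ∧ s.getD (i + 1) ' ' = '*' then
      aLoop s (aBlock s (i + 2) 1)
    else true
  else false
termination_by s.length - i
decreasing_by
  · exact Nat.sub_succ_lt_self s.length i h
  · exact Nat.sub_lt_sub_left h (aLine_gt s i h (by rw [hc2.1]; decide))
  · exact Nat.sub_lt_sub_left h
      (Nat.lt_of_lt_of_le (Nat.lt_add_of_pos_right Nat.zero_lt_two) (aBlock_ge s (i + 2) 1))

def has_real_content_py (stmt : String) : Bool := aLoop stmt.toList 0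

-- ===== PORT B =====
inductive BMode where
  | N | L | B
deriving DecidableEq, Repr

-- one step of B's cleaning state machine (mode, depth, skip-next flag, kept chars)
def bStep (st : BMode × Int × Bool × List Char) (p : Char × Option Char) :
    BMode × Int × Bool × List Char :=
  match st, p with
  | (m, d, sk, k), (ch, nxt) =>
    if sk then (m, d, false, k)
    else
      match m with
      | .N =>
        if ch = '-' ∧ nxt = some '-' then (.L, d, false, k)
        else if ch = '/' ∧ nxt = some '*' then (.B, 1, true, k)
        else (.N, d, false, k ++ [ch])
      | .L => if ch = '\n' then (.N, d, false, k) else (.L, d, false, k)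
      | .B =>
        if ch = '/' ∧ nxt = some '*' then (.B, d + 1, true, k)
        else if ch = '*' ∧ nxt = some '/' then
          if d - 1 = 0 then (.N, d - 1, true, k) else (.B, d - 1, true, k)
        else (.B, d, false, k)

-- zip(stmt, nxts) with nxts = list(stmt[1:]) + [None]
def bPairs (s : List Char) : List (Char × Option Char) :=
  s.zip ((s.drop 1).map some ++ [none])

def has_real_content_py_alt (stmt : String) : Bool :=
  (((bPairs stmt.toList).foldl bStep (BMode.N, 0, false, [])).2.2.2).any
    (fun c => !(PySem.Chars.isspace c) && c != ';')

-- ===== PRECONDITION & SPEC =====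
def Spec_has_real_content_py (stmt : String) (out : Bool) : Prop := out = has_real_content_py_alt stmt
instance (stmt : String) (out : Bool) : Decidable (Spec_has_real_content_py stmt out) := by unfold Spec_has_real_content_py; infer_instance

-- ===== CLAIM (what is proved, stated in full; the proofs are below) =====
def Claim_equal_has_real_content_py : Prop := ∀ (stmt : String), Dom_has_real_content_py stmt → Spec_has_real_content_py stmt (has_real_content_py stmt)

-- ===== LEMMAS AND PROOFS =====
def sig (c : Char) : Bool := !(PySem.Chars.isspace c) && c != ';'

def hasSigFrom (l : List (Char × Option Char)) (m : BMode) (d : Int) : Bool :=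
  ((l.foldl bStep (m, d, false, [])).2.2.2).any sig

theorem bStep_kept (m : BMode) (d : Int) (sk : Bool) (k : List Char) (p : Char × Option Char) :
    bStep (m, d, sk, k) p =
      ((bStep (m, d, sk, []) p).1, (bStep (m, d, sk, []) p).2.1, (bStep (m, d, sk, []) p).2.2.1,
        k ++ (bStep (m, d, sk, []) p).2.2.2) := by
  obtain ⟨ch, nxt⟩ := p
  cases m <;> simp [bStep] <;> split_ifs <;> simp

theorem foldl_bStep_kept (l : List (Char × Option Char)) (m : BMode) (d : Int) (sk : Bool) (k : List Char) :
    l.foldl bStep (m, d, sk, k) =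
      ((l.foldl bStep (m, d, sk, [])).1, (l.foldl bStep (m, d, sk, [])).2.1,
        (l.foldl bStep (m, d, sk, [])).2.2.1, k ++ (l.foldl bStep (m, d, sk, [])).2.2.2) := by
  induction l generalizing m d sk k with
  | nil => simp
  | cons p rest ih =>
    simp only [List.foldl_cons]
    rw [bStep_kept]
    rw [ih ((bStep (m, d, sk, []) p).1) ((bStep (m, d, sk, []) p).2.1) ((bStep (m, d, sk, []) p).2.2.1) (k ++ (bStep (m, d, sk, []) p).2.2.2)]
    conv_rhs => rw [show bStep (m, d, sk, []) p = ((bStep (m, d, sk, []) p).1, (bStep (m, d, sk, []) p).2.1, (bStep (m, d, sk, []) p).2.2.1, (bStep (m, d, sk, []) p).2.2.2) from rfl,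
      ih ((bStep (m, d, sk, []) p).1) ((bStep (m, d, sk, []) p).2.1) ((bStep (m, d, sk, []) p).2.2.1) ((bStep (m, d, sk, []) p).2.2.2)]
    simp

theorem foldl_skip (p : Char × Option Char) (rest : List (Char × Option Char)) (m : BMode) (d : Int) (k : List Char) :
    (p :: rest).foldl bStep (m, d, true, k) = rest.foldl bStep (m, d, false, k) := by
  obtain ⟨ch, nxt⟩ := p
  simp [bStep]

-- evaluation lemmas for one bStep step (conditions as Props, no simp normalization)
theorem bStep_N_line (ch : Char) (nxt : Option Char) (d : Int) (k : List Char)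
    (h : ch = '-' ∧ nxt = some '-') :
    bStep (.N, d, false, k) (ch, nxt) = (.L, d, false, k) := by
  simp only [bStep]; rw [if_neg (by simp), if_pos h]

theorem bStep_N_block (ch : Char) (nxt : Option Char) (d : Int) (k : List Char)
    (h1 : ¬(ch = '-' ∧ nxt = some '-')) (h2 : ch = '/' ∧ nxt = some '*') :
    bStep (.N, d, false, k) (ch, nxt) = (.B, 1, true, k) := by
  simp only [bStep]; rw [if_neg (by simp), if_neg h1, if_pos h2]

theorem bStep_N_keep (ch : Char) (nxt : Option Char) (d : Int) (k : List Char)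
    (h1 : ¬(ch = '-' ∧ nxt = some '-')) (h2 : ¬(ch = '/' ∧ nxt = some '*')) :
    bStep (.N, d, false, k) (ch, nxt) = (.N, d, false, k ++ [ch]) := by
  simp only [bStep]; rw [if_neg (by simp), if_neg h1, if_neg h2]

theorem bStep_L_nl (ch : Char) (nxt : Option Char) (d : Int) (k : List Char)
    (h : ch = '\n') :
    bStep (.L, d, false, k) (ch, nxt) = (.N, d, false, k) := by
  simp only [bStep]; rw [if_neg (by simp), if_pos h]

theorem bStep_L_other (ch : Char) (nxt : Option Char) (d : Int) (k : List Char)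
    (h : ch ≠ '\n') :
    bStep (.L, d, false, k) (ch, nxt) = (.L, d, false, k) := by
  simp only [bStep]; rw [if_neg (by simp), if_neg h]

theorem bStep_B_open (ch : Char) (nxt : Option Char) (d : Int) (k : List Char)
    (h : ch = '/' ∧ nxt = some '*') :
    bStep (.B, d, false, k) (ch, nxt) = (.B, d + 1, true, k) := by
  simp only [bStep]; rw [if_neg (by simp), if_pos h]

theorem bStep_B_close0 (ch : Char) (nxt : Option Char) (d : Int) (k : List Char)
    (h1 : ¬(ch = '/' ∧ nxt = some '*')) (h2 : ch = '*' ∧ nxt = some '/') (h3 : d - 1 = 0) :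
    bStep (.B, d, false, k) (ch, nxt) = (.N, d - 1, true, k) := by
  simp only [bStep]; rw [if_neg (by simp), if_neg h1, if_pos h2, if_pos h3]

theorem bStep_B_close (ch : Char) (nxt : Option Char) (d : Int) (k : List Char)
    (h1 : ¬(ch = '/' ∧ nxt = some '*')) (h2 : ch = '*' ∧ nxt = some '/') (h3 : ¬(d - 1 = 0)) :
    bStep (.B, d, false, k) (ch, nxt) = (.B, d - 1, true, k) := by
  simp only [bStep]; rw [if_neg (by simp), if_neg h1, if_pos h2, if_neg h3]

theorem bStep_B_other (ch : Char) (nxt : Option Char) (d : Int) (k : List Char)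
    (h1 : ¬(ch = '/' ∧ nxt = some '*')) (h2 : ¬(ch = '*' ∧ nxt = some '/')) :
    bStep (.B, d, false, k) (ch, nxt) = (.B, d, false, k) := by
  simp only [bStep]; rw [if_neg (by simp), if_neg h1, if_neg h2]

theorem bPairs_length (s : List Char) : (bPairs s).length = s.length := by
  simp [bPairs]; omega

theorem bPairs_drop_len (s : List Char) (i : Nat) (h : s.length ≤ i) : (bPairs s).drop i = [] := by
  apply List.drop_eq_nil_of_le; rw [bPairs_length]; exact h

theorem bPairs_drop (s : List Char) (i : Nat) (h : i < s.length) :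
    (bPairs s).drop i =
      (s.getD i ' ', if i + 1 < s.length then some (s.getD (i + 1) ' ') else none) :: (bPairs s).drop (i + 1) := by
  have hl : i < (bPairs s).length := by rw [bPairs_length]; exact h
  rw [List.drop_eq_getElem_cons hl]
  congr 1
  simp only [bPairs]
  rw [List.getElem_zip, Prod.mk.injEq]
  refine ⟨by simp [List.getD, h], ?_⟩
  by_cases h2 : i + 1 < s.length
  · rw [List.getElem_append_left (by simp; omega)]
    simp [List.getD, h2]
  · rw [List.getElem_append_right (by simp; omega)]
    simp [h2]

theorem nxt_eq_some (s : List Char) (i : Nat) (c : Char) :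
    ((if i + 1 < s.length then some (s.getD (i + 1) ' ') else none) = some c) ↔
      (i + 1 < s.length ∧ s.getD (i + 1) ' ' = c) := by
  split <;> simp_all

theorem aLine_step (s : List Char) (i : Nat) (h : i < s.length) (hc : s.getD i ' ' ≠ '\n') :
    aLine s i = aLine s (i + 1) := by
  nth_rewrite 1 [aLine.eq_def]
  rw [dif_pos h, dif_pos hc]

theorem aLine_stop (s : List Char) (i : Nat) (h : i ≤ s.length) :
    aLine s i = s.length ∨ (aLine s i < s.length ∧ s.getD (aLine s i) ' ' = '\n') := by
  rw [aLine]
  split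
  · rename_i h1
    split
    · exact aLine_stop s (i + 1) (by omega)
    · rename_i hc
      right
      exact ⟨h1, not_not.mp hc⟩
  · left; omega
termination_by s.length - i
decreasing_by omega

theorem line_skip (s : List Char) (i : Nat) :
    hasSigFrom ((bPairs s).drop i) .L 0 = hasSigFrom ((bPairs s).drop (aLine s i)) .L 0 := by
  by_cases h : i < s.length
  · by_cases hc : s.getD i ' ' = '\n'
    · have he : aLine s i = i := by rw [aLine]; rw [dif_pos h, dif_neg (not_not_intro hc)]
      rw [he]
    · rw [aLine_step s i h hc, bPairs_drop s i h]
      simp only [hasSigFrom, List.foldl_cons]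
      rw [bStep_L_other _ _ _ _ hc]
      exact line_skip s (i + 1)
  · have he : aLine s i = i := by rw [aLine]; rw [dif_neg h]
    rw [he]
termination_by s.length - i
decreasing_by omega

theorem block_skip (s : List Char) (i : Nat) (d : Int) (hd : 0 < d) :
    hasSigFrom ((bPairs s).drop i) .B d = hasSigFrom ((bPairs s).drop (aBlock s i d)) .N 0 := by
  by_cases h : i < s.length
  · rw [bPairs_drop s i h]
    by_cases h1 : s.getD i ' ' = '/' ∧ i + 1 < s.length ∧ s.getD (i + 1) ' ' = '*'
    · have hab : aBlock s i d = aBlock s (i + 2) (d + 1) := by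
        conv_lhs => rw [aBlock]
        rw [dif_pos ⟨h, hd⟩, if_pos h1]
      have hnxt : (if i + 1 < s.length then some (s.getD (i + 1) ' ') else none) = some '*' := by
        rw [nxt_eq_some]; exact ⟨h1.2.1, h1.2.2⟩
      simp only [hasSigFrom, List.foldl_cons]
      rw [bStep_B_open _ _ _ _ ⟨h1.1, hnxt⟩]
      rw [bPairs_drop s (i + 1) h1.2.1, foldl_skip, hab]
      exact block_skip s (i + 2) (d + 1) (by omega)
    · by_cases h2 : s.getD i ' ' = '*' ∧ i + 1 < s.length ∧ s.getD (i + 1) ' ' = '/'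
      · have hnxt : (if i + 1 < s.length then some (s.getD (i + 1) ' ') else none) = some '/' := by
          rw [nxt_eq_some]; exact ⟨h2.2.1, h2.2.2⟩
        have hn1 : ¬(s.getD i ' ' = '/' ∧ (if i + 1 < s.length then some (s.getD (i + 1) ' ') else none) = some '*') := by
          rw [nxt_eq_some]; tauto
        have hab : aBlock s i d = aBlock s (i + 2) (d - 1) := by
          conv_lhs => rw [aBlock]
          rw [dif_pos ⟨h, hd⟩, if_neg h1, if_pos h2]
        by_cases hd1 : d - 1 = 0
        · have hab2 : aBlock s (i + 2) (d - 1) = i + 2 := by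
            rw [aBlock]; rw [dif_neg (by omega)]
          simp only [hasSigFrom, List.foldl_cons]
          rw [bStep_B_close0 _ _ _ _ hn1 ⟨h2.1, hnxt⟩ hd1]
          rw [bPairs_drop s (i + 1) h2.2.1, foldl_skip, hab, hab2, hd1]
        · simp only [hasSigFrom, List.foldl_cons]
          rw [bStep_B_close _ _ _ _ hn1 ⟨h2.1, hnxt⟩ hd1]
          rw [bPairs_drop s (i + 1) h2.2.1, foldl_skip, hab]
          exact block_skip s (i + 2) (d - 1) (by omega)
      · have hab : aBlock s i d = aBlock s (i + 1) d := by
          conv_lhs => rw [aBlock]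
          rw [dif_pos ⟨h, hd⟩, if_neg h1, if_neg h2]
        have hn1 : ¬(s.getD i ' ' = '/' ∧ (if i + 1 < s.length then some (s.getD (i + 1) ' ') else none) = some '*') := by
          rw [nxt_eq_some]; tauto
        have hn2 : ¬(s.getD i ' ' = '*' ∧ (if i + 1 < s.length then some (s.getD (i + 1) ' ') else none) = some '/') := by
          rw [nxt_eq_some]; tauto
        simp only [hasSigFrom, List.foldl_cons]
        rw [bStep_B_other _ _ _ _ hn1 hn2, hab]
        exact block_skip s (i + 1) d hd
  · have hab : aBlock s i d = i := by rw [aBlock]; rw [dif_neg (by omega)]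
    rw [hab, bPairs_drop_len s i (by omega)]
    rfl
termination_by s.length - i
decreasing_by all_goals omega

theorem main_loop (s : List Char) (i : Nat) :
    aLoop s i = hasSigFrom ((bPairs s).drop i) .N 0 := by
  rw [aLoop]
  split
  case isTrue h =>
    rw [bPairs_drop s i h]
    split
    case isTrue hc1 =>
      have hsig : sig (s.getD i ' ') = false := by
        rcases hc1 with h' | h'
        · simp only [sig, h', Bool.not_true, Bool.false_and]
        · rw [sig, h']; decide
      have hchm : s.getD i ' ' ≠ '-' := by
        intro he; rw [he] at hc1; revert hc1; decide
      have hchs : s.getD i ' ' ≠ '/' := by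
        intro he; rw [he] at hc1; revert hc1; decide
      simp only [hasSigFrom, List.foldl_cons]
      rw [bStep_N_keep _ _ _ _ (fun hx => hchm hx.1) (fun hx => hchs hx.1)]
      simp only [List.nil_append]
      rw [foldl_bStep_kept _ _ _ _ [s.getD i ' ']]
      simp only [List.any_append, List.any_cons, List.any_nil, hsig, Bool.false_or, Bool.or_false]
      exact main_loop s (i + 1)
    case isFalse hnc1 =>
      split
      case isTrue hc2 =>
        have hnxt : (if i + 1 < s.length then some (s.getD (i + 1) ' ') else none) = some '-' := by
          rw [nxt_eq_some]; exact ⟨hc2.2.1, hc2.2.2⟩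
        simp only [hasSigFrom, List.foldl_cons]
        rw [bStep_N_line _ _ _ _ ⟨hc2.1, hnxt⟩]
        have hlsk := line_skip s (i + 1)
        simp only [hasSigFrom] at hlsk
        rw [hlsk]
        have hstep : aLine s i = aLine s (i + 1) := aLine_step s i h (by rw [hc2.1]; decide)
        have hj1 : i + 1 ≤ aLine s (i + 1) := aLine_ge s (i + 1)
        rcases aLine_stop s (i + 1) (by omega) with hend | ⟨hlt, hnl⟩
        · rw [hstep, hend]
          rw [bPairs_drop_len s s.length (by omega)]
          rw [aLoop]; rw [dif_neg (by omega)]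
          rfl
        · rw [hstep]
          rw [bPairs_drop s (aLine s (i + 1)) hlt]
          simp only [List.foldl_cons]
          rw [bStep_L_nl _ _ _ _ hnl]
          rw [aLoop]; rw [dif_pos hlt, dif_pos (Or.inl (by rw [hnl]; decide))]
          exact main_loop s (aLine s (i + 1) + 1)
      case isFalse hnc2 =>
        split
        case isTrue hc3 =>
          have hnxt : (if i + 1 < s.length then some (s.getD (i + 1) ' ') else none) = some '*' := by
            rw [nxt_eq_some]; exact ⟨hc3.2.1, hc3.2.2⟩
          have hchm : s.getD i ' ' ≠ '-' := by rw [hc3.1]; decide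
          simp only [hasSigFrom, List.foldl_cons]
          rw [bStep_N_block _ _ _ _ (fun hx => hchm hx.1) ⟨hc3.1, hnxt⟩]
          rw [bPairs_drop s (i + 1) hc3.2.1, foldl_skip]
          have hbsk := block_skip s (i + 2) 1 (by omega)
          simp only [hasSigFrom] at hbsk
          rw [hbsk]
          have hge := aBlock_ge s (i + 2) 1
          exact main_loop s (aBlock s (i + 2) 1)
        case isFalse hnc3 =>
          have h1 : PySem.Chars.isspace (s.getD i ' ') = false := by
            cases hx : PySem.Chars.isspace (s.getD i ' ')
            · rfl
            · exact absurd (Or.inl hx) hnc1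
          have h2 : s.getD i ' ' ≠ ';' := fun he => hnc1 (Or.inr he)
          have hsig : sig (s.getD i ' ') = true := by
            simp only [sig, h1, Bool.not_false, Bool.true_and, bne_iff_ne, ne_eq]
            exact h2
          have hn1 : ¬(s.getD i ' ' = '-' ∧ (if i + 1 < s.length then some (s.getD (i + 1) ' ') else none) = some '-') := by
            rw [nxt_eq_some]; tauto
          have hn2 : ¬(s.getD i ' ' = '/' ∧ (if i + 1 < s.length then some (s.getD (i + 1) ' ') else none) = some '*') := by
            rw [nxt_eq_some]; tauto
          simp only [hasSigFrom, List.foldl_cons]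
          rw [bStep_N_keep _ _ _ _ hn1 hn2]
          simp only [List.nil_append]
          rw [foldl_bStep_kept _ _ _ _ [s.getD i ' ']]
          simp only [List.any_append, List.any_cons, List.any_nil, hsig, Bool.true_or]
  case isFalse h =>
    rw [bPairs_drop_len s i (by omega)]
    rfl
termination_by s.length - i
decreasing_by all_goals omega


-- ===== VERDICT (by name: the statement is the Claim_ definition above) =====
theorem has_real_content_py_spec : Claim_equal_has_real_content_py := by
  intro stmt _
  unfold Spec_has_real_content_py has_real_content_py has_real_content_py_alt
  have := main_loop stmt.toList 0
  simpa [hasSigFrom, sig] using this
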